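-- pv_equiv track=rewrite | github.com/cfirneno/-risxsci.com | ehr_integration.py | _parse_hl7_message
-- ===== SOURCE A (Python) =====
-- from typing import Dict, List, Any, Optional, Union, Tuple
--
-- def _parse_hl7_message(message: str) -> Dict[str, List[Dict[str, Any]]]:
--     """Parse HL7 message into segments"""
--     segments = {}
--     lines = message.strip().split('\n')
--
--     for line in lines:
--         if not line.strip():
--             continue
--
--         fields = line.split('|')
--         segment_type = fields[0]
--
--         if segment_type not in segments:
--             segments[segment_type] = []
--
--         # Parse fields based on segment type
--         if segment_type == "MSH":
--             segments[segment_type].append({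
--                 "encoding_chars": fields[1] if len(fields) > 1 else "",
--                 "sending_application": fields[2] if len(fields) > 2 else "",
--                 "sending_facility": fields[3] if len(fields) > 3 else "",
--                 "receiving_application": fields[4] if len(fields) > 4 else "",
--                 "receiving_facility": fields[5] if len(fields) > 5 else "",
--                 "timestamp": fields[6] if len(fields) > 6 else "",
--                 "security": fields[7] if len(fields) > 7 else "",
--                 "message_type": fields[8] if len(fields) > 8 else "",
--                 "message_control_id": fields[9] if len(fields) > 9 else "",
--                 "processing_id": fields[10] if len(fields) > 10 else "",
--                 "version_id": fields[11] if len(fields) > 11 else ""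
--             })
--         elif segment_type == "PID":
--             segments[segment_type].append({
--                 "patient_id": fields[3] if len(fields) > 3 else "",
--                 "patient_name": fields[5] if len(fields) > 5 else "",
--                 "birth_date": fields[7] if len(fields) > 7 else "",
--                 "gender": fields[8] if len(fields) > 8 else "",
--                 "race": fields[10] if len(fields) > 10 else "",
--                 "address": fields[11] if len(fields) > 11 else "",
--                 "phone": fields[13] if len(fields) > 13 else ""
--             })
--         elif segment_type == "OBX":
--             segments[segment_type].append({
--                 "set_id": fields[1] if len(fields) > 1 else "",
--                 "value_type": fields[2] if len(fields) > 2 else "",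
--                 "observation_id": fields[3] if len(fields) > 3 else "",
--                 "observation_sub_id": fields[4] if len(fields) > 4 else "",
--                 "observation_value": fields[5] if len(fields) > 5 else "",
--                 "units": fields[6] if len(fields) > 6 else "",
--                 "reference_range": fields[7] if len(fields) > 7 else "",
--                 "abnormal_flags": fields[8] if len(fields) > 8 else "",
--                 "result_status": fields[11] if len(fields) > 11 else ""
--             })
--         else:
--             # Generic parsing for other segments
--             segment_data = {}
--             for i, field in enumerate(fields[1:], 1):
--                 segment_data[f"field_{i}"] = field
--             segments[segment_type].append(segment_data)
--
--     return segments
-- ===== SOURCE B (Python) =====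
-- # Positional-layout parser: each known segment type has a layout array indexed by
-- # field position (None = unused); lines are parsed to (type, record) pairs using a
-- # padded field list (no per-field length checks), and the result is assembled
-- # per distinct type by filtering, instead of A's incremental dict mutation.
--
-- _LAYOUTS = {
--     "MSH": [None, "encoding_chars", "sending_application", "sending_facility",
--             "receiving_application", "receiving_facility", "timestamp", "security",
--             "message_type", "message_control_id", "processing_id", "version_id"],
--     "PID": [None, None, None, "patient_id", None, "patient_name", None, "birth_date",
--             "gender", None, "race", "address", None, "phone"],
--     "OBX": [None, "set_id", "value_type", "observation_id", "observation_sub_id",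
--             "observation_value", "units", "reference_range", "abnormal_flags",
--             None, None, "result_status"],
-- }
--
--
-- def _record(line):
--     fields = line.split('|')
--     seg = fields[0]
--     layout = _LAYOUTS.get(seg)
--     if layout is None:
--         return seg, {f"field_{i}": f for i, f in enumerate(fields[1:], 1)}
--     padded = fields + [""] * len(layout)
--     return seg, {name: padded[i] for i, name in enumerate(layout) if name is not None}
--
--
-- def _parse_hl7_message(message: str):
--     """Parse lines to (type, record) pairs, then assemble the result per distinct type."""
--     parsed = [_record(ln) for ln in message.strip().split('\n') if ln.strip()]
--     order = []
--     for seg, _ in parsed: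
--         if seg not in order:
--             order.append(seg)
--     return {seg: [rec for s, rec in parsed if s == seg] for seg in order}
-- ===== Notes on version B (the rewrite author's own statement) =====
-- stated objective: alternative
-- what changed: Replaces A's single pass of if/elif hard-coded dict literals with per-field length guards and in-place dict mutation by a different data representation and assembly: positional layout arrays (field position -> key name) applied to a padded field list produce (type, record) pairs, and the result dict is then built per distinct type by filtering those pairs, not by incremental setdefault/append mutation.
import Mathlib
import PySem

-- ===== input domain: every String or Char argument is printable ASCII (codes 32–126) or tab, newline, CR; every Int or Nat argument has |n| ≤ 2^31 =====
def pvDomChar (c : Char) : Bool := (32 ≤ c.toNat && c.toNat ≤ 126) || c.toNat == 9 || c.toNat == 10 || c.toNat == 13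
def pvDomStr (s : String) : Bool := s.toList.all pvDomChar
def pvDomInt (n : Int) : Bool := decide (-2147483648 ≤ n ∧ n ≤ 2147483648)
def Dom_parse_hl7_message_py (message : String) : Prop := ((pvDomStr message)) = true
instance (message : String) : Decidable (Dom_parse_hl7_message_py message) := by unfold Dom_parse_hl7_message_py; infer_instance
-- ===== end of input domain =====

-- B parses each line with a positional layout array over a padded field list and then
-- assembles the result per distinct segment type by filtering the parsed pairs,
-- instead of A's if/elif dict literals with per-field guards and in-place dict mutation.

-- s.split(sep) for the nonempty literal separators "|" and "\n": split? is `some` there, exact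
def pvSplit (s sep : String) : List String := (PySem.Str.split? s sep).getD []

-- ===== PORT A =====
-- fields[i] if len(fields) > i else ""  (i a literal nonnegative index, so xs[i] is getD)
def pvFld (fields : List String) (i : Nat) : String :=
  if fields.length > i then fields.getD i "" else ""

-- the body of A's for-loop; Python record-dict literals have pairwise distinct literal keys,
-- so each dict literal's item list is exactly the written assoc list.
def pvStepA (segs : PySem.Dict String (List (List (String × String)))) (line : String) :
    PySem.Dict String (List (List (String × String))) :=
  if PySem.Str.strip line = "" then segs
  else
    let fields := pvSplit line "|"
    let st := PySem.List.pyGetD fields 0 ""   -- fields[0]; split always yields a nonempty list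
    let segs1 := if segs.contains st then segs else segs.insert st []
    let rec_ : List (String × String) :=
      if st = "MSH" then
        [("encoding_chars", pvFld fields 1), ("sending_application", pvFld fields 2),
         ("sending_facility", pvFld fields 3), ("receiving_application", pvFld fields 4),
         ("receiving_facility", pvFld fields 5), ("timestamp", pvFld fields 6),
         ("security", pvFld fields 7), ("message_type", pvFld fields 8),
         ("message_control_id", pvFld fields 9), ("processing_id", pvFld fields 10),
         ("version_id", pvFld fields 11)]
      else if st = "PID" then
        [("patient_id", pvFld fields 3), ("patient_name", pvFld fields 5),
         ("birth_date", pvFld fields 7), ("gender", pvFld fields 8),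
         ("race", pvFld fields 10), ("address", pvFld fields 11), ("phone", pvFld fields 13)]
      else if st = "OBX" then
        [("set_id", pvFld fields 1), ("value_type", pvFld fields 2),
         ("observation_id", pvFld fields 3), ("observation_sub_id", pvFld fields 4),
         ("observation_value", pvFld fields 5), ("units", pvFld fields 6),
         ("reference_range", pvFld fields 7), ("abnormal_flags", pvFld fields 8),
         ("result_status", pvFld fields 11)]
      else
        -- generic loop: each key f"field_{i}" is fresh, so dict assignment appends
        (PySem.List.enumerate (fields.drop 1) 1).foldl
          (fun d p => d ++ [("field_" ++ PySem.Int.toStr p.1, p.2)]) []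
    segs1.modify st [] (· ++ [rec_])

def parse_hl7_message_py (message : String) : List (String × List (List (String × String))) :=
  ((pvSplit (PySem.Str.strip message) "\n").foldl pvStepA PySem.Dict.empty).items

-- ===== PORT B =====
-- module-level _LAYOUTS table: field position -> key name (none = unused position)
def pvLayouts : PySem.Dict String (List (Option String)) :=
  PySem.Dict.ofList
    [("MSH", [none, some "encoding_chars", some "sending_application", some "sending_facility",
              some "receiving_application", some "receiving_facility", some "timestamp",
              some "security", some "message_type", some "message_control_id",
              some "processing_id", some "version_id"]),
     ("PID", [none, none, none, some "patient_id", none, some "patient_name", none,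
              some "birth_date", some "gender", none, some "race", some "address",
              none, some "phone"]),
     ("OBX", [none, some "set_id", some "value_type", some "observation_id",
              some "observation_sub_id", some "observation_value", some "units",
              some "reference_range", some "abnormal_flags", none, none,
              some "result_status"])]

-- _record(line): the dict comprehensions run over pairwise distinct keys, so each is
-- exactly the assoc list its filterMap/map produces.
def pvRecord (line : String) : String × List (String × String) :=
  let fields := pvSplit line "|"
  let seg := PySem.List.pyGetD fields 0 ""
  match pvLayouts.get? seg with
  | none =>
      (seg, (PySem.List.enumerate (fields.drop 1) 1).map
        (fun p => ("field_" ++ PySem.Int.toStr p.1, p.2)))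
  | some layout =>
      let padded := fields ++ List.replicate layout.length ""
      (seg, (PySem.List.enumerate layout 0).filterMap
        (fun p => p.2.map (fun name => (name, PySem.List.pyGetD padded p.1 ""))))

def parse_hl7_message_py_alt (message : String) : List (String × List (List (String × String))) :=
  let parsed := ((pvSplit (PySem.Str.strip message) "\n").filter
      (fun ln => !(PySem.Str.strip ln == ""))).map pvRecord
  -- 'if seg not in order: order.append(seg)' is the set-building idiom: PySem.Set.add
  let order := parsed.foldl (fun o p => PySem.Set.add o p.1) PySem.Set.empty
  order.map (fun seg => (seg, (parsed.filter (fun p => p.1 == seg)).map (·.2)))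

-- ===== PRECONDITION & SPEC =====
def Spec_parse_hl7_message_py (message : String) (out : List (String × List (List (String × String)))) : Prop := out = parse_hl7_message_py_alt message
instance (message : String) (out : List (String × List (List (String × String)))) : Decidable (Spec_parse_hl7_message_py message out) := by unfold Spec_parse_hl7_message_py; infer_instance

-- ===== CLAIM (what is proved, stated in full; the proofs are below) =====
def Claim_equal_parse_hl7_message_py : Prop := ∀ (message : String), Dom_parse_hl7_message_py message → Spec_parse_hl7_message_py message (parse_hl7_message_py message)

-- ===== LEMMAS AND PROOFS =====

-- proof-side name for A's per-line record (the if/elif chain of pvStepA, verbatim)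
def pvRecA (fields : List String) (st : String) : List (String × String) :=
  if st = "MSH" then
    [("encoding_chars", pvFld fields 1), ("sending_application", pvFld fields 2),
     ("sending_facility", pvFld fields 3), ("receiving_application", pvFld fields 4),
     ("receiving_facility", pvFld fields 5), ("timestamp", pvFld fields 6),
     ("security", pvFld fields 7), ("message_type", pvFld fields 8),
     ("message_control_id", pvFld fields 9), ("processing_id", pvFld fields 10),
     ("version_id", pvFld fields 11)]
  else if st = "PID" then
    [("patient_id", pvFld fields 3), ("patient_name", pvFld fields 5),
     ("birth_date", pvFld fields 7), ("gender", pvFld fields 8),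
     ("race", pvFld fields 10), ("address", pvFld fields 11), ("phone", pvFld fields 13)]
  else if st = "OBX" then
    [("set_id", pvFld fields 1), ("value_type", pvFld fields 2),
     ("observation_id", pvFld fields 3), ("observation_sub_id", pvFld fields 4),
     ("observation_value", pvFld fields 5), ("units", pvFld fields 6),
     ("reference_range", pvFld fields 7), ("abnormal_flags", pvFld fields 8),
     ("result_status", pvFld fields 11)]
  else
    (PySem.List.enumerate (fields.drop 1) 1).foldl
      (fun d p => d ++ [("field_" ++ PySem.Int.toStr p.1, p.2)]) []

-- setdefault-then-append collapses to a single modify with default []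
lemma pvInsert_modify (d : PySem.Dict String (List (List (String × String)))) (k : String)
    (f : List (List (String × String)) → List (List (String × String))) :
    (if d.contains k then d else d.insert k []).modify k [] f = d.modify k [] f := by
  by_cases hc : d.contains k = true
  · rw [if_pos hc]
  · have hc' : d.contains k = false := by simpa using hc
    rw [if_neg hc]
    unfold PySem.Dict.modify
    rw [PySem.Dict.getD_insert_self, PySem.Dict.insert_insert_self]
    simp [PySem.Dict.getD_of_not_contains, hc']

-- padded indexing equals A's guarded indexing
lemma pvPad_get (fields : List String) (n : Nat) (i : Int) (h0 : 0 ≤ i) (h : i < n) :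
    PySem.List.pyGetD (fields ++ List.replicate n "") i "" = pvFld fields i.toNat := by
  have hi : i = ((i.toNat : Nat) : Int) := by omega
  rw [hi, PySem.List.pyGetD_natCast]
  simp only [Int.toNat_natCast]
  unfold pvFld
  by_cases h2 : fields.length > i.toNat
  · rw [if_pos h2]
    simp [List.getD, List.getElem?_append_left h2]
  · rw [if_neg h2]
    simp [List.getD, List.getElem?_append_right (by omega : fields.length ≤ i.toNat),
      (by omega : i.toNat - fields.length < n)]

-- B's layout record equals A's branch record
lemma pvRecord_eq (line : String) :
    pvRecord line = (PySem.List.pyGetD (pvSplit line "|") 0 "",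
      pvRecA (pvSplit line "|") (PySem.List.pyGetD (pvSplit line "|") 0 "")) := by
  simp only [pvRecord, pvRecA]
  set fields := pvSplit line "|" with hf
  by_cases h1 : PySem.List.pyGetD fields 0 "" = "MSH"
  · rw [h1, show pvLayouts.get? "MSH" = some
      [none, some "encoding_chars", some "sending_application", some "sending_facility",
       some "receiving_application", some "receiving_facility", some "timestamp",
       some "security", some "message_type", some "message_control_id",
       some "processing_id", some "version_id"] from by decide]
    simp only [PySem.List.enumerate_cons, PySem.List.enumerate_nil,
      List.filterMap_cons, List.filterMap_nil, Option.map_some, Option.map_none,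
      List.length_cons, List.length_nil]
    norm_num [pvPad_get]
    exact ⟨rfl, rfl, rfl, rfl, rfl, rfl, rfl, rfl, rfl, rfl⟩
  · by_cases h2 : PySem.List.pyGetD fields 0 "" = "PID"
    · rw [h2, show pvLayouts.get? "PID" = some
        [none, none, none, some "patient_id", none, some "patient_name", none,
         some "birth_date", some "gender", none, some "race", some "address",
         none, some "phone"] from by decide]
      simp only [PySem.List.enumerate_cons, PySem.List.enumerate_nil,
        List.filterMap_cons, List.filterMap_nil, Option.map_some, Option.map_none,
        List.length_cons, List.length_nil]
      norm_num [pvPad_get]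
      rfl
    · by_cases h3 : PySem.List.pyGetD fields 0 "" = "OBX"
      · rw [h3, show pvLayouts.get? "OBX" = some
          [none, some "set_id", some "value_type", some "observation_id",
           some "observation_sub_id", some "observation_value", some "units",
           some "reference_range", some "abnormal_flags", none, none,
           some "result_status"] from by decide]
        simp only [PySem.List.enumerate_cons, PySem.List.enumerate_nil,
          List.filterMap_cons, List.filterMap_nil, Option.map_some, Option.map_none,
          List.length_cons, List.length_nil]
        norm_num [pvPad_get]
        rfl
      · have hnone : pvLayouts.get? (PySem.List.pyGetD fields 0 "") = none := by
          have : pvLayouts = PySem.Dict.mk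
            [("MSH", [none, some "encoding_chars", some "sending_application", some "sending_facility",
              some "receiving_application", some "receiving_facility", some "timestamp",
              some "security", some "message_type", some "message_control_id",
              some "processing_id", some "version_id"]),
             ("PID", [none, none, none, some "patient_id", none, some "patient_name", none,
              some "birth_date", some "gender", none, some "race", some "address",
              none, some "phone"]),
             ("OBX", [none, some "set_id", some "value_type", some "observation_id",
              some "observation_sub_id", some "observation_value", some "units",
              some "reference_range", some "abnormal_flags", none, none,
              some "result_status"])] := by decide
          rw [this]
          simp [PySem.Dict.get?, (beq_iff_eq ..).ne.mpr (Ne.symm h1),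
            (beq_iff_eq ..).ne.mpr (Ne.symm h2), (beq_iff_eq ..).ne.mpr (Ne.symm h3)]
        rw [hnone]
        simp only [if_neg h1, if_neg h2, if_neg h3]
        rw [PySem.List.foldl_append_singleton_eq_map, List.nil_append]

-- A's loop body on a non-blank line is one modify keyed by B's parsed pair
lemma pvStepA_eq (d : PySem.Dict String (List (List (String × String)))) (line : String)
    (h : ¬ PySem.Str.strip line = "") :
    pvStepA d line = d.modify (pvRecord line).1 [] (· ++ [(pvRecord line).2]) := by
  rw [pvRecord_eq]
  simp only [pvStepA, if_neg h]
  rw [pvInsert_modify]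
  rfl

-- A's whole fold is B's grouping fold over the parsed pairs
lemma pvMain (lines : List String) (d : PySem.Dict String (List (List (String × String)))) :
    lines.foldl pvStepA d =
      ((lines.filter (fun ln => !(PySem.Str.strip ln == ""))).map pvRecord).foldl
        (fun d p => d.modify p.1 [] (· ++ [p.2])) d := by
  induction lines generalizing d with
  | nil => rfl
  | cons l ls ih =>
    by_cases h : PySem.Str.strip l = ""
    · rw [List.foldl_cons, show pvStepA d l = d from by simp [pvStepA, h],
        show (l :: ls).filter (fun ln => !(PySem.Str.strip ln == "")) =
          ls.filter (fun ln => !(PySem.Str.strip ln == "")) from by simp [h]]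
      exact ih d
    · rw [List.foldl_cons,
        show (l :: ls).filter (fun ln => !(PySem.Str.strip ln == "")) =
          l :: ls.filter (fun ln => !(PySem.Str.strip ln == "")) from by simp [h],
        List.map_cons, List.foldl_cons, ← pvStepA_eq d l h]
      exact ih (pvStepA d l)

-- ===== VERDICT (by name: the statement is the Claim_ definition above) =====
theorem parse_hl7_message_py_spec : Claim_equal_parse_hl7_message_py := by
  intro message _
  unfold Spec_parse_hl7_message_py parse_hl7_message_py parse_hl7_message_py_alt
  rw [pvMain]
  set parsed := ((pvSplit (PySem.Str.strip message) "\n").filter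
      (fun ln => !(PySem.Str.strip ln == ""))).map pvRecord with hp
  have hnd : (parsed.foldl (fun d p => d.modify p.1 [] (· ++ [p.2])) PySem.Dict.empty).keys.Nodup := by
    exact PySem.Dict.nodup_keys_foldl_modify_key parsed Prod.fst [] (fun _ p => (· ++ [p.2]))
      PySem.Dict.empty (by simp)
  rw [PySem.Dict.items_eq_map_keys _ hnd []]
  have hkeys : (parsed.foldl (fun d p => d.modify p.1 [] (· ++ [p.2])) PySem.Dict.empty).keys
      = parsed.foldl (fun o p => PySem.Set.add o p.1) PySem.Set.empty := by
    rw [PySem.Dict.keys_foldl_modify_key parsed Prod.fst [] (fun _ p => (· ++ [p.2]))]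
    simp only [PySem.Set.update, List.foldl_map]
    rfl
  rw [hkeys]
  apply List.map_congr_left
  intro k _
  rw [PySem.Dict.getD_foldl_modify_append]
  simp
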